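-- pv_equiv track=rewrite | github.com/vanicat/satisfactory-notebook | satifactory.py | sub_needed
-- ===== SOURCE A (Python) =====
-- def sub_needed(n1, n2):
--     items = set(n1).union(set(n2))
--     result = {}
--     for i in items:
--         if i in n1:
--             if i in n2:
--                 u1, p1 = n1[i]
--                 u2, p2 = n2[i]
--                 if p1 - p2 != 0:
--                     result[i] = (u1 - u2, p1 - p2)
--             else:
--                 result[i] = n1[i]
--         else:
--             assert i in n2
--             u2, p2 = n2[i]
--             result[i] = (- u2, - p2)
--     return result
-- ===== SOURCE B (Python) =====
-- def sub_needed(n1, n2):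
--     # Subtract-in-place accumulator, then filter: copy n1, fold n2 into it
--     # by componentwise subtraction with (0, 0) default, finally drop shared
--     # keys whose p-difference is zero.
--     delta = dict(n1)
--     for k, (u2, p2) in n2.items():
--         u1, p1 = delta.get(k, (0, 0))
--         delta[k] = (u1 - u2, p1 - p2)
--     return {k: v for k, v in delta.items()
--             if not (k in n1 and k in n2 and v[1] == 0)}
-- ===== Notes on version B (the rewrite author's own statement) =====
-- stated objective: alternative
-- what changed: Replaces A's loop over the union key-set with three-way membership branching by a subtract-in-place accumulator: copy n1, fold n2 into it by componentwise subtraction with a (0,0) default, then one filter dropping shared keys whose p-difference is zero.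
import Mathlib
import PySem

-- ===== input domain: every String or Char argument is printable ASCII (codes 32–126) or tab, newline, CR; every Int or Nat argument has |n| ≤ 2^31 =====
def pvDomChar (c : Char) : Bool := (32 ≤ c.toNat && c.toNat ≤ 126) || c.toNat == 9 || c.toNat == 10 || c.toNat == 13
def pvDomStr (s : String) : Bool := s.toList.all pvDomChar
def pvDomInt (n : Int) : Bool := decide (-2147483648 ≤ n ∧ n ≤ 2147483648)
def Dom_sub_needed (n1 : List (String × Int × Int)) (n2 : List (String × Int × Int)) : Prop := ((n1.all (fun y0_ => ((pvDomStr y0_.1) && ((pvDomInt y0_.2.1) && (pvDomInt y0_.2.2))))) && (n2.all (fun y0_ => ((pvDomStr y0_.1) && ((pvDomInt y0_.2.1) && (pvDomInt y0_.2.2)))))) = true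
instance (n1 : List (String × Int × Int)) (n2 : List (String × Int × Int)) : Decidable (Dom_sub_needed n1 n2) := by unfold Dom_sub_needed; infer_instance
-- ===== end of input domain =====

-- B replaces A's union-of-key-sets loop with three-way membership branching by a
-- subtract-in-place accumulator (copy n1, fold n2 into it componentwise with (0,0)
-- default) followed by one filter; same return value, different decomposition.
-- Output dicts are association lists compared as dicts (order-insensitively) against
-- Python, whose set-iteration order is arbitrary; the two ports agree as lists.

-- ===== PORT A =====
def sub_needed (n1 : List (String × Int × Int)) (n2 : List (String × Int × Int)) : List (String × Int × Int) :=
  let d1 : PySem.Dict String (Int × Int) := PySem.Dict.ofList n1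
  let d2 : PySem.Dict String (Int × Int) := PySem.Dict.ofList n2
  -- items = set(n1).union(set(n2))
  let items : PySem.Set String :=
    PySem.Set.union (PySem.Set.ofList d1.keys) (PySem.Set.ofList d2.keys)
  -- for i in items: … (result built key by key; Python's set-iteration order is arbitrary)
  let result : PySem.Dict String (Int × Int) :=
    items.foldl (fun r i =>
      if d1.contains i then
        if d2.contains i then
          let u1 := (d1.getD i (0, 0)).1
          let p1 := (d1.getD i (0, 0)).2
          let u2 := (d2.getD i (0, 0)).1
          let p2 := (d2.getD i (0, 0)).2
          if p1 - p2 ≠ 0 then r.insert i (u1 - u2, p1 - p2) else r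
        else r.insert i (d1.getD i (0, 0))
      else
        let u2 := (d2.getD i (0, 0)).1
        let p2 := (d2.getD i (0, 0)).2
        r.insert i (-u2, -p2)) PySem.Dict.empty
  result.items

-- ===== PORT B =====
def sub_needed_alt (n1 : List (String × Int × Int)) (n2 : List (String × Int × Int)) : List (String × Int × Int) :=
  let d1 : PySem.Dict String (Int × Int) := PySem.Dict.ofList n1
  let d2 : PySem.Dict String (Int × Int) := PySem.Dict.ofList n2
  -- delta = dict(n1); for k,(u2,p2) in n2.items(): delta[k] = delta.get(k,(0,0)) - (u2,p2)
  let delta : PySem.Dict String (Int × Int) :=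
    d2.items.foldl (fun d kv =>
      let u1 := (d.getD kv.1 (0, 0)).1
      let p1 := (d.getD kv.1 (0, 0)).2
      d.insert kv.1 (u1 - kv.2.1, p1 - kv.2.2)) d1
  -- {k: v for k, v in delta.items() if not (k in n1 and k in n2 and v[1] == 0)}
  delta.items.filter (fun kv => !(d1.contains kv.1 && d2.contains kv.1 && kv.2.2 == 0))

-- ===== PRECONDITION & SPEC =====
def Spec_sub_needed (n1 : List (String × Int × Int)) (n2 : List (String × Int × Int)) (out : List (String × Int × Int)) : Prop := out = sub_needed_alt n1 n2
instance (n1 : List (String × Int × Int)) (n2 : List (String × Int × Int)) (out : List (String × Int × Int)) : Decidable (Spec_sub_needed n1 n2 out) := by unfold Spec_sub_needed; infer_instance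

-- ===== CLAIM (what is proved, stated in full; the proofs are below) =====
def Claim_equal_sub_needed : Prop := ∀ (n1 : List (String × Int × Int)) (n2 : List (String × Int × Int)), Dom_sub_needed n1 n2 → Spec_sub_needed n1 n2 (sub_needed n1 n2)

-- ===== LEMMAS AND PROOFS =====

-- the per-key value of A's loop, as an Option (none = key skipped)
def pvEntry (d1 d2 : PySem.Dict String (Int × Int)) (k : String) : Option (String × Int × Int) :=
  if d1.contains k then
    if d2.contains k then
      if (d1.getD k (0, 0)).2 - (d2.getD k (0, 0)).2 ≠ 0 then
        some (k, ((d1.getD k (0, 0)).1 - (d2.getD k (0, 0)).1,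
                  (d1.getD k (0, 0)).2 - (d2.getD k (0, 0)).2))
      else none
    else some (k, d1.getD k (0, 0))
  else some (k, (-(d2.getD k (0, 0)).1, -(d2.getD k (0, 0)).2))

theorem pvFoldA (d1 d2 : PySem.Dict String (Int × Int)) :
    ∀ (U : List String) (r : PySem.Dict String (Int × Int)), U.Nodup →
      (∀ k ∈ U, r.contains k = false) →
      (U.foldl (fun r i =>
        if d1.contains i then
          if d2.contains i then
            if (d1.getD i (0, 0)).2 - (d2.getD i (0, 0)).2 ≠ 0 then
              r.insert i ((d1.getD i (0, 0)).1 - (d2.getD i (0, 0)).1,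
                          (d1.getD i (0, 0)).2 - (d2.getD i (0, 0)).2)
            else r
          else r.insert i (d1.getD i (0, 0))
        else r.insert i (-(d2.getD i (0, 0)).1, -(d2.getD i (0, 0)).2)) r).items
      = r.items ++ U.filterMap (pvEntry d1 d2) := by
  intro U
  induction U with
  | nil => intro r _ _; simp
  | cons k t ih =>
    intro r hnd hfresh
    have hkr : r.contains k = false := hfresh k (by simp)
    have hknt : k ∉ t := (List.nodup_cons.mp hnd).1
    have hnd' : t.Nodup := (List.nodup_cons.mp hnd).2
    have fresh' : ∀ (v : Int × Int), ∀ k' ∈ t, (r.insert k v).contains k' = false := by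
      intro v k' hk'
      rw [PySem.Dict.contains_insert]
      have : k' ≠ k := fun h => hknt (h ▸ hk')
      simp [this, hfresh k' (List.mem_cons_of_mem _ hk')]
    by_cases h1 : d1.contains k = true
    · by_cases h2 : d2.contains k = true
      · by_cases h3 : (d1.getD k (0, 0)).2 - (d2.getD k (0, 0)).2 ≠ 0
        · rw [List.foldl_cons, if_pos h1, if_pos h2, if_pos h3,
            ih _ hnd' (fresh' _), PySem.Dict.items_insert_of_not_contains _ _ hkr]
          simp [pvEntry, h1, h2, h3]
        · rw [List.foldl_cons, if_pos h1, if_pos h2, if_neg h3,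
            ih _ hnd' (fun k' hk' => hfresh k' (List.mem_cons_of_mem _ hk'))]
          simp [pvEntry, h1, h2, h3]
      · rw [List.foldl_cons, if_pos h1, if_neg h2,
          ih _ hnd' (fresh' _), PySem.Dict.items_insert_of_not_contains _ _ hkr]
        simp [pvEntry, h1, h2]
    · rw [List.foldl_cons, if_neg h1,
        ih _ hnd' (fresh' _), PySem.Dict.items_insert_of_not_contains _ _ hkr]
      simp [pvEntry, h1]

theorem pvFoldB_notmem (l : List (String × (Int × Int))) (k : String)
    (hk : k ∉ l.map (·.1)) :
    ∀ (d : PySem.Dict String (Int × Int)),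
      (l.foldl (fun d kv =>
        d.insert kv.1 ((d.getD kv.1 (0, 0)).1 - kv.2.1, (d.getD kv.1 (0, 0)).2 - kv.2.2)) d).getD k (0, 0)
      = d.getD k (0, 0) := by
  induction l with
  | nil => intro d; rfl
  | cons kv t ih =>
    intro d
    have h1 : k ∉ t.map (·.1) := fun h => hk (by simp [h])
    have h2 : k ≠ kv.1 := by intro h; exact hk (by simp [h])
    rw [List.foldl_cons, ih h1, PySem.Dict.getD_insert]
    simp [h2]

theorem pvFoldB (l : List (String × (Int × Int))) :
    ∀ (hl : (l.map (·.1)).Nodup) (d : PySem.Dict String (Int × Int)) (k : String),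
      (l.foldl (fun d kv =>
        d.insert kv.1 ((d.getD kv.1 (0, 0)).1 - kv.2.1, (d.getD kv.1 (0, 0)).2 - kv.2.2)) d).getD k (0, 0)
      = match l.find? (fun p => p.1 == k) with
        | some kv => ((d.getD k (0, 0)).1 - kv.2.1, (d.getD k (0, 0)).2 - kv.2.2)
        | none => d.getD k (0, 0) := by
  induction l with
  | nil => intro _ d k; rfl
  | cons kv t ih =>
    intro hl d k
    have hnd : (t.map (·.1)).Nodup := (List.nodup_cons.mp (by simpa using hl)).2
    by_cases hk : k = kv.1
    · have hkt : k ∉ t.map (·.1) := by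
        subst hk
        exact (List.nodup_cons.mp (by simpa using hl)).1
      rw [List.foldl_cons, pvFoldB_notmem t k hkt, PySem.Dict.getD_insert]
      simp [hk, List.find?_cons, beq_iff_eq]
    · rw [List.foldl_cons, ih hnd]
      have : (kv.1 == k) = false := by simp [Ne.symm hk]
      simp only [List.find?_cons, this]
      rw [PySem.Dict.getD_insert]
      simp [hk]

theorem pvFilterMapAux {α β : Type} (f : α → β) (p : β → Bool) (l : List α) :
    (l.map f).filter p = l.filterMap (fun a => if p (f a) then some (f a) else none) := by
  induction l with
  | nil => rfl
  | cons a t ih =>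
    simp only [List.map_cons, List.filter_cons, List.filterMap_cons]
    by_cases h : p (f a) <;> simp [h, ih]

theorem pvUnionEq (s : List String) (hs : s.Nodup) (xs : List String) :
    PySem.Set.union (PySem.Set.ofList s) (PySem.Set.ofList xs) = PySem.Set.update s xs := by
  show PySem.Set.update (PySem.Set.ofList s) (PySem.Set.ofList xs) = _
  rw [PySem.Set.ofList_eq_self_of_nodup s hs,
      PySem.Set.update_eq_append_filter s (PySem.Set.ofList xs),
      PySem.Set.update_eq_append_filter s xs, PySem.Set.ofList_ofList]

theorem pvMain (n1 : List (String × Int × Int)) (n2 : List (String × Int × Int)) :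
    sub_needed n1 n2 = sub_needed_alt n1 n2 := by
  set d1 : PySem.Dict String (Int × Int) := PySem.Dict.ofList n1 with hd1
  set d2 : PySem.Dict String (Int × Int) := PySem.Dict.ofList n2 with hd2
  have hk1 : d1.keys.Nodup := PySem.Dict.nodup_keys_ofList n1
  have hk2 : d2.keys.Nodup := PySem.Dict.nodup_keys_ofList n2
  have hi2 : (d2.items.map (·.1)).Nodup := hk2
  set U : PySem.Set String :=
    PySem.Set.union (PySem.Set.ofList d1.keys) (PySem.Set.ofList d2.keys) with hUdef
  have hU : U.Nodup := PySem.Set.nodup_union _ _ (PySem.Set.nodup_ofList _)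
  set delta : PySem.Dict String (Int × Int) :=
    d2.items.foldl (fun d kv =>
      d.insert kv.1 ((d.getD kv.1 (0, 0)).1 - kv.2.1, (d.getD kv.1 (0, 0)).2 - kv.2.2)) d1
    with hdelta
  have hndelta : delta.keys.Nodup := by
    exact PySem.Dict.nodup_keys_foldl_insert_key d2.items (fun kv => kv.1)
      (fun d kv => ((d.getD kv.1 (0, 0)).1 - kv.2.1, (d.getD kv.1 (0, 0)).2 - kv.2.2)) d1 hk1
  have hkeys : delta.keys = PySem.Set.update d1.keys (d2.items.map (·.1)) := by
    exact PySem.Dict.keys_foldl_insert_key d2.items (fun kv => kv.1)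
      (fun d kv => ((d.getD kv.1 (0, 0)).1 - kv.2.1, (d.getD kv.1 (0, 0)).2 - kv.2.2)) d1
  have hUkeys : U = delta.keys := by
    rw [hkeys, hUdef, pvUnionEq d1.keys hk1 d2.keys]; rfl
  show (U.foldl (fun r i =>
        if d1.contains i then
          if d2.contains i then
            if (d1.getD i (0, 0)).2 - (d2.getD i (0, 0)).2 ≠ 0 then
              r.insert i ((d1.getD i (0, 0)).1 - (d2.getD i (0, 0)).1,
                          (d1.getD i (0, 0)).2 - (d2.getD i (0, 0)).2)
            else r
          else r.insert i (d1.getD i (0, 0))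
        else r.insert i (-(d2.getD i (0, 0)).1, -(d2.getD i (0, 0)).2)) PySem.Dict.empty).items
    = delta.items.filter (fun kv => !(d1.contains kv.1 && d2.contains kv.1 && kv.2.2 == 0))
  rw [pvFoldA d1 d2 U PySem.Dict.empty hU
      (fun k _ => PySem.Dict.contains_empty k),
    PySem.Dict.items_eq_map_keys delta hndelta (0, 0), ← hUkeys,
    pvFilterMapAux (fun k => (k, delta.getD k (0, 0)))
      (fun kv => !(d1.contains kv.1 && d2.contains kv.1 && kv.2.2 == 0)) U]
  simp only [List.nil_append]
  refine List.filterMap_congr ?_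
  intro k hkU
  have hgetd : delta.getD k (0, 0) =
      match d2.items.find? (fun p => p.1 == k) with
      | some kv => ((d1.getD k (0, 0)).1 - kv.2.1, (d1.getD k (0, 0)).2 - kv.2.2)
      | none => d1.getD k (0, 0) := pvFoldB d2.items hi2 d1 k
  cases hfind : d2.items.find? (fun p => p.1 == k) with
  | none =>
    have hc2 : d2.contains k = false := by
      have := List.find?_eq_none.mp hfind
      simp only [PySem.Dict.contains]
      rw [List.any_eq_false]
      exact fun p hp => this p hp
    have hc1 : d1.contains k = true := by
      rcases (PySem.Set.mem_union _ _ _).mp (hUdef ▸ hkU) with h | h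
      · exact (PySem.Dict.contains_iff_mem_keys d1 k).mpr ((PySem.Set.mem_ofList _ _).mp h)
      · exfalso
        have hk2m := (PySem.Set.mem_ofList _ _).mp h
        rw [← PySem.Dict.contains_iff_mem_keys] at hk2m
        simp [hc2] at hk2m
    rw [hgetd, hfind]
    simp [pvEntry, hc1, hc2]
  | some kv =>
    have hkv1 : kv.1 = k := by
      have := List.find?_some hfind
      simpa using this
    have hc2 : d2.contains k = true := by
      simp only [PySem.Dict.contains]
      rw [List.any_eq_true]
      exact ⟨kv, List.mem_of_find?_eq_some hfind, by simp [hkv1]⟩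
    have hget2 : d2.get? k = some kv.2 := by
      simp only [PySem.Dict.get?, hfind, Option.map_some]
    have hgd2 : d2.getD k (0, 0) = kv.2 := PySem.Dict.getD_of_get?_eq_some d2 (0, 0) hget2
    rw [hgetd, hfind]
    by_cases hc1 : d1.contains k = true
    · by_cases hz : (d1.getD k (0, 0)).2 - kv.2.2 = 0
      · simp [pvEntry, hc1, hc2, hgd2, hz]
      · simp [pvEntry, hc1, hc2, hgd2, hz]
    · have h10 : d1.getD k (0, 0) = (0, 0) :=
        PySem.Dict.getD_of_not_contains d1 (0, 0) (by simpa using hc1)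
      simp [pvEntry, hc1, hc2, hgd2, h10]

-- ===== VERDICT (by name: the statement is the Claim_ definition above) =====
theorem sub_needed_spec : Claim_equal_sub_needed := by
  intro n1 n2 _
  exact pvMain n1 n2
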